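-- pv_equiv track=rewrite | github.com/173TECH/sayn | sayn/utils/misc.py | reverse_dict_inclusive
-- ===== SOURCE A (Python) =====
-- from itertools import groupby
--
-- def reverse_dict_inclusive(dag):
--     rev = {
--         i[0]: [ii[1] for ii in i[1]]
--         for i in groupby(
--             sorted(
--                 [(parent, node) for node, parents in dag.items() for parent in parents]
--             ),
--             lambda x: x[0],
--         )
--     }
--     rev.update({n: list() for n in dag.keys() if n not in rev})
--     return rev
-- ===== SOURCE B (Python) =====
-- def reverse_dict_inclusive(dag):
--     rev = {}
--     for node, parents in dag.items():
--         for parent in parents: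
--             rev.setdefault(parent, []).append(node)
--     result = {p: sorted(rev[p]) for p in sorted(rev)}
--     for n in dag:
--         if n not in result:
--             result[n] = []
--     return result
-- ===== Notes on version B (the rewrite author's own statement) =====
-- stated objective: faster
-- what changed: Replaces the global sort of the whole edge list plus itertools.groupby with hash grouping: one pass appends each node into a per-parent bucket dict, then the result is built from the sorted key set with a per-key sort of each (smaller) bucket, and missing keys are added by a simple loop.
import Mathlib
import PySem

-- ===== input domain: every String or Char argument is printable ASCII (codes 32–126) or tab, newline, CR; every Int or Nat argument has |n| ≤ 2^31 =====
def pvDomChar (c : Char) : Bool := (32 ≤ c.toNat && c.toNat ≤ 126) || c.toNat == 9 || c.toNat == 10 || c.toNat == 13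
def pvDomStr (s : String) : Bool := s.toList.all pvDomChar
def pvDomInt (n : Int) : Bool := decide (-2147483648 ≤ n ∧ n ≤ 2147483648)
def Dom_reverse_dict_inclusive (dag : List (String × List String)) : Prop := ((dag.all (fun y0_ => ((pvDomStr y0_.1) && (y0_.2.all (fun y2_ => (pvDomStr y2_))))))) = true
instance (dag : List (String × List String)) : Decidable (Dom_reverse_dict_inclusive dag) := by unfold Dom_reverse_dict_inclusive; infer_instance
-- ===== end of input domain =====

-- B replaces A's global edge-list sort + groupby by per-parent bucket grouping in a dict,
-- then sorted keys with a per-bucket sort (idiomatic; same result, proved equal below).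


-- ===== PORT A =====
-- itertools.groupby(l, key=fst) consumed into (key, [snd of group]) pairs; exact for this use
def pvGroupByFst : List (String × String) → List (String × List String)
  | [] => []
  | e :: t =>
      (e.1, e.2 :: (t.takeWhile (fun x => x.1 == e.1)).map (fun x => x.2)) ::
        pvGroupByFst (t.dropWhile (fun x => x.1 == e.1))
  termination_by l => l.length
  decreasing_by
    simp only [List.length_cons]
    exact Nat.lt_succ_of_le (List.length_dropWhile_le _ _)

def reverse_dict_inclusive (dag : List (String × List String)) : List (String × List String) :=
  let items := (PySem.Dict.ofList dag).items
  let edges := items.flatMap (fun i => i.2.map (fun parent => (parent, i.1)))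
  let sortedE := PySem.List.sorted2 edges (fun x => x.1) (fun x => x.2)
  let rev := PySem.Dict.ofList (pvGroupByFst sortedE)
  let upd := PySem.Dict.ofList
    (((items.map (fun i => i.1)).filter (fun n => !rev.contains n)).map
      (fun n => (n, ([] : List String))))
  (rev.update upd.items).items

-- ===== PORT B =====
def reverse_dict_inclusive_alt (dag : List (String × List String)) : List (String × List String) :=
  let items := (PySem.Dict.ofList dag).items
  let rev := items.foldl
    (fun d i => i.2.foldl (fun d parent => d.modify parent [] (fun l => l ++ [i.1])) d)
    PySem.Dict.empty
  let result := PySem.Dict.ofList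
    ((PySem.List.sorted rev.keys (fun x => x)).map
      (fun p => (p, PySem.List.sorted (rev.getD p []) (fun x => x))))
  let result2 := items.foldl
    (fun r i => if r.contains i.1 then r else r.insert i.1 []) result
  result2.items

-- ===== PRECONDITION & SPEC =====
def Spec_reverse_dict_inclusive (dag : List (String × List String)) (out : List (String × List String)) : Prop := out = reverse_dict_inclusive_alt dag
instance (dag : List (String × List String)) (out : List (String × List String)) : Decidable (Spec_reverse_dict_inclusive dag out) := by unfold Spec_reverse_dict_inclusive; infer_instance

-- ===== CLAIM (what is proved, stated in full; the proofs are below) =====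
def Claim_equal_reverse_dict_inclusive : Prop := ∀ (dag : List (String × List String)), Dom_reverse_dict_inclusive dag → Spec_reverse_dict_inclusive dag (reverse_dict_inclusive dag)

-- ===== LEMMAS AND PROOFS =====

-- lexicographic ≤ on pairs, Python tuple order
def pvLexLe (a b : String × String) : Prop := a.1 < b.1 ∨ (a.1 = b.1 ∧ a.2 ≤ b.2)

theorem pvLexLe_trans {a b c : String × String} (h1 : pvLexLe a b) (h2 : pvLexLe b c) : pvLexLe a c := by
  rcases h1 with h1 | ⟨h1, h1'⟩ <;> rcases h2 with h2 | ⟨h2, h2'⟩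
  · exact Or.inl (lt_trans h1 h2)
  · exact Or.inl (h2 ▸ h1)
  · exact Or.inl (h1 ▸ h2)
  · exact Or.inr ⟨h1.trans h2, le_trans h1' h2'⟩

theorem pv_blex_true {a b : String × String}
    (h : (decide (a.1 < b.1) || !decide (b.1 < a.1) && decide (a.2 < b.2)) = true) : pvLexLe a b := by
  simp only [Bool.or_eq_true, Bool.and_eq_true, Bool.not_eq_true', decide_eq_true_eq,
    decide_eq_false_iff_not] at h
  rcases h with h | ⟨h1, h2⟩
  · exact Or.inl h
  · by_cases hlt : a.1 < b.1
    · exact Or.inl hlt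
    · exact Or.inr ⟨le_antisymm (not_lt.mp h1) (not_lt.mp hlt), h2.le⟩

theorem pv_blex_false {a b : String × String}
    (h : ¬ ((decide (a.1 < b.1) || !decide (b.1 < a.1) && decide (a.2 < b.2)) = true)) : pvLexLe b a := by
  simp only [Bool.or_eq_true, Bool.and_eq_true, Bool.not_eq_true', decide_eq_true_eq,
    decide_eq_false_iff_not, not_or, not_and, not_not] at h
  obtain ⟨h1, h2⟩ := h
  by_cases hlt : b.1 < a.1
  · exact Or.inl hlt
  · have he : b.1 = a.1 := le_antisymm (not_lt.mp h1) (not_lt.mp hlt)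
    exact Or.inr ⟨he, not_lt.mp (h2 (not_lt.mp hlt))⟩

theorem pv_insertBy_lex (x : String × String) (ys : List (String × String))
    (h : ys.Pairwise pvLexLe) :
    (PySem.List.insertBy
      (fun a b => decide (a.1 < b.1) || !decide (b.1 < a.1) && decide (a.2 < b.2)) x ys).Pairwise pvLexLe := by
  induction ys with
  | nil => simp [PySem.List.insertBy]
  | cons y t ih =>
    rw [List.pairwise_cons] at h
    obtain ⟨hy, ht⟩ := h
    by_cases hb : (decide (x.1 < y.1) || !decide (y.1 < x.1) && decide (x.2 < y.2)) = true
    · rw [PySem.List.insertBy, if_pos hb]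
      have hxy : pvLexLe x y := pv_blex_true hb
      refine List.pairwise_cons.mpr ⟨?_, List.pairwise_cons.mpr ⟨hy, ht⟩⟩
      intro z hz
      rcases List.mem_cons.mp hz with rfl | hz
      · exact hxy
      · exact pvLexLe_trans hxy (hy z hz)
    · rw [PySem.List.insertBy, if_neg hb]
      refine List.pairwise_cons.mpr ⟨?_, ih ht⟩
      intro z hz
      rcases (PySem.List.insertBy_mem_iff _ _ _ _).mp hz with rfl | hz
      · exact pv_blex_false hb
      · exact hy z hz

theorem pv_foldl_insertBy_lex (xs acc : List (String × String)) (h : acc.Pairwise pvLexLe) :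
    (xs.foldl (fun acc x => PySem.List.insertBy
      (fun a b => decide (a.1 < b.1) || !decide (b.1 < a.1) && decide (a.2 < b.2)) x acc) acc).Pairwise pvLexLe := by
  induction xs generalizing acc with
  | nil => exact h
  | cons x t ih => exact ih _ (pv_insertBy_lex x acc h)

theorem pv_sorted2_pairwise (xs : List (String × String)) :
    (PySem.List.sorted2 xs (fun x => x.1) (fun x => x.2)).Pairwise pvLexLe := by
  simp only [PySem.List.sorted2]
  exact pv_foldl_insertBy_lex xs [] (List.Pairwise.nil)

theorem pv_discard_ofList (k : String) (zs : List String) :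
    (PySem.Set.ofList zs).discard k = PySem.Set.ofList (zs.filter (fun x => !(x == k))) := by
  induction zs with
  | nil => rfl
  | cons z t ih =>
    by_cases hz : z = k
    · subst hz
      rw [PySem.Set.ofList_cons]
      simp only [List.filter_cons, beq_self_eq_true, Bool.not_true, Bool.false_eq_true, if_false]
      rw [← ih]
      simp [PySem.Set.discard, List.filter_filter]
    · rw [PySem.Set.ofList_cons]
      have hzk : (z == k) = false := by simp [hz]
      simp only [List.filter_cons, hzk, Bool.not_false, if_true]
      rw [PySem.Set.ofList_cons, ← ih]
      simp only [PySem.Set.discard, List.filter_cons, hzk, Bool.not_false, beq_self_eq_true,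
        Bool.not_true, Bool.false_eq_true, if_false, if_true]
      rw [List.filter_comm]

theorem pv_ofList_sublist (zs : List String) : (PySem.Set.ofList zs).Sublist zs := by
  induction zs with
  | nil => exact List.Sublist.refl _
  | cons z t ih =>
    rw [PySem.Set.ofList_cons]
    exact List.Sublist.cons₂ z ((List.filter_sublist).trans ih)

-- groupby of a lex-sorted pair list: one group per distinct key, in key order
theorem pv_groupBy_char (l : List (String × String)) (h : l.Pairwise pvLexLe) :
    pvGroupByFst l = (PySem.Set.ofList (l.map (fun e => e.1))).map
      (fun k => (k, (l.filter (fun e => e.1 == k)).map (fun e => e.2))) := by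
  induction l using pvGroupByFst.induct with
  | case1 => simp [pvGroupByFst]
  | case2 e t ih =>
    rw [List.pairwise_cons] at h
    obtain ⟨he, ht⟩ := h
    have htsplit : t.takeWhile (fun x => x.1 == e.1) ++ t.dropWhile (fun x => x.1 == e.1) = t :=
      List.takeWhile_append_dropWhile
    have hfsplit : ∀ (q : (String × String) → Bool), t.filter q
        = (t.takeWhile (fun x => x.1 == e.1)).filter q
          ++ (t.dropWhile (fun x => x.1 == e.1)).filter q := by
      intro q
      conv_lhs => rw [← htsplit]
      rw [List.filter_append]
    have hmsplit : t.map (fun e => e.1)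
        = (t.takeWhile (fun x => x.1 == e.1)).map (fun e => e.1)
          ++ (t.dropWhile (fun x => x.1 == e.1)).map (fun e => e.1) := by
      conv_lhs => rw [← htsplit]
      rw [List.map_append]
    have ht2pw : (t.dropWhile (fun x => x.1 == e.1)).Pairwise pvLexLe :=
      List.Pairwise.sublist (List.dropWhile_sublist _) ht
    have ht1k : ∀ x ∈ t.takeWhile (fun x => x.1 == e.1), x.1 = e.1 := by
      intro x hx
      simpa using List.mem_takeWhile_imp hx
    have ht2k : ∀ x ∈ t.dropWhile (fun x => x.1 == e.1), e.1 < x.1 := by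
      cases hd : t.dropWhile (fun x => x.1 == e.1) with
      | nil => intro x hx; simp at hx
      | cons h2 r2 =>
        have hh2 : (h2.1 == e.1) = false := by
          simpa [hd] using List.head_dropWhile_not (fun x => x.1 == e.1) (l := t)
            (by rw [hd]; simp)
        have hh2mem : h2 ∈ t := (List.dropWhile_sublist _).mem
          (by rw [hd]; exact List.mem_cons_self)
        have hh2lt : e.1 < h2.1 := by
          rcases he h2 hh2mem with h' | ⟨h', _⟩
          · exact h'
          · exact absurd h'.symm (by simpa using hh2)
        intro x hx
        rcases List.mem_cons.mp hx with rfl | hx'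
        · exact hh2lt
        · have hpw : pvLexLe h2 x := (List.pairwise_cons.mp (hd ▸ ht2pw)).1 x hx'
          rcases hpw with h' | ⟨h', _⟩
          · exact lt_trans hh2lt h'
          · exact h' ▸ hh2lt
    rw [pvGroupByFst, ih ht2pw]
    have hkeys : PySem.Set.ofList ((e :: t).map (fun e => e.1))
        = e.1 :: PySem.Set.ofList ((t.dropWhile (fun x => x.1 == e.1)).map (fun e => e.1)) := by
      rw [List.map_cons, PySem.Set.ofList_cons, pv_discard_ofList, hmsplit, List.filter_append]
      have h1 : ((t.takeWhile (fun x => x.1 == e.1)).map (fun e => e.1)).filter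
          (fun x => !(x == e.1)) = [] := by
        rw [List.filter_eq_nil_iff]
        intro a ha
        obtain ⟨x, hx, rfl⟩ := List.mem_map.mp ha
        simp [ht1k x hx]
      have h2 : ((t.dropWhile (fun x => x.1 == e.1)).map (fun e => e.1)).filter
          (fun x => !(x == e.1)) = (t.dropWhile (fun x => x.1 == e.1)).map (fun e => e.1) := by
        rw [List.filter_eq_self]
        intro a ha
        obtain ⟨x, hx, rfl⟩ := List.mem_map.mp ha
        simp [ne_of_gt (ht2k x hx)]
      rw [h1, h2, List.nil_append]
    rw [hkeys, List.map_cons]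
    congr 1
    · congr 1
      have hhead : (e :: t).filter (fun x => x.1 == e.1)
          = e :: t.takeWhile (fun x => x.1 == e.1) := by
        rw [List.filter_cons, if_pos (by simp), hfsplit]
        have hf1 : (t.takeWhile (fun x => x.1 == e.1)).filter (fun x => x.1 == e.1)
            = t.takeWhile (fun x => x.1 == e.1) := by
          rw [List.filter_eq_self]; intro a ha; simp [ht1k a ha]
        have hf2 : (t.dropWhile (fun x => x.1 == e.1)).filter (fun x => x.1 == e.1) = [] := by
          rw [List.filter_eq_nil_iff]; intro a ha; simp [ne_of_gt (ht2k a ha)]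
        rw [hf1, hf2, List.append_nil]
      rw [hhead, List.map_cons]
    · apply List.map_congr_left
      intro k hk
      have hkmem : ∃ x ∈ t.dropWhile (fun x => x.1 == e.1), x.1 = k := by
        have := (PySem.Set.mem_ofList _ _).mp hk
        obtain ⟨x, hx, hxe⟩ := List.mem_map.mp this
        exact ⟨x, hx, hxe⟩
      obtain ⟨x0, hx0, rfl⟩ := hkmem
      have hklt : e.1 < x0.1 := ht2k x0 hx0
      have hfl : (e :: t).filter (fun x => x.1 == x0.1)
          = (t.dropWhile (fun x => x.1 == e.1)).filter (fun x => x.1 == x0.1) := by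
        rw [List.filter_cons, if_neg (by simp only [beq_iff_eq]; exact ne_of_lt hklt), hfsplit]
        have hf1 : (t.takeWhile (fun x => x.1 == e.1)).filter (fun x => x.1 == x0.1) = [] := by
          rw [List.filter_eq_nil_iff]; intro a ha
          simp only [ht1k a ha, beq_iff_eq]; exact ne_of_lt hklt
        rw [hf1, List.nil_append]
      rw [hfl]

-- dict built from pairs with distinct keys has exactly those items
theorem pv_ofList_items (pairs : List (String × List String))
    (h : (pairs.map (fun p => p.1)).Nodup) : (PySem.Dict.ofList pairs).items = pairs := by
  have := PySem.Dict.items_foldl_insert_fresh pairs (fun p => p.1) (fun p => p.2)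
      PySem.Dict.empty (by intro a _; exact PySem.Dict.contains_empty _) h
  simpa [PySem.Dict.ofList, PySem.Dict.update] using this

-- the 'add [] for missing keys' loop appends the not-yet-present keys
theorem pv_fold_missing (ks : List String) (r : PySem.Dict String (List String)) (h : ks.Nodup) :
    (ks.foldl (fun r n => if r.contains n then r else r.insert n []) r).items
      = r.items ++ (ks.filter (fun n => !r.contains n)).map (fun n => (n, ([] : List String))) := by
  induction ks generalizing r with
  | nil => simp
  | cons k t ih =>
    rw [List.nodup_cons] at h
    obtain ⟨hk, ht⟩ := h
    by_cases hc : r.contains k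
    · simp only [List.foldl_cons, if_pos hc, List.filter_cons, hc, Bool.not_true,
        Bool.false_eq_true, if_false]
      exact ih r ht
    · have hc' : r.contains k = false := by simpa using hc
      simp only [List.foldl_cons, List.filter_cons, hc', Bool.not_false, Bool.false_eq_true, if_false, if_true]
      rw [ih _ ht, PySem.Dict.items_insert_of_not_contains _ _ hc']
      have hfil : t.filter (fun n => !(r.insert k []).contains n) = t.filter (fun n => !r.contains n) := by
        apply List.filter_congr
        intro n hn
        have hne : n ≠ k := fun e => hk (e ▸ hn)
        have hnk : (n == k) = false := by simp [hne]
        simp [PySem.Dict.contains_insert, hnk]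
      rw [hfil]
      simp

-- the nested bucket loop is the flat loop over the edge list
theorem pv_fold_edges (items : List (String × List String)) (d : PySem.Dict String (List String)) :
    items.foldl
      (fun d i => i.2.foldl (fun d parent => d.modify parent [] (fun l => l ++ [i.1])) d) d
      = (items.flatMap (fun i => i.2.map (fun parent => (parent, i.1)))).foldl
          (fun d e => d.modify e.1 [] (fun l => l ++ [e.2])) d := by
  induction items generalizing d with
  | nil => rfl
  | cons i t ih =>
    simp only [List.foldl_cons, List.flatMap_cons, List.foldl_append, List.foldl_map]
    exact ih _

-- the two pipelines agree on any items list with distinct keys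
theorem pv_main (items : List (String × List String))
    (hnd : (items.map (fun i => i.1)).Nodup) :
    (let edges := items.flatMap (fun i => i.2.map (fun parent => (parent, i.1)))
     let sortedE := PySem.List.sorted2 edges (fun x => x.1) (fun x => x.2)
     let rev := PySem.Dict.ofList (pvGroupByFst sortedE)
     let upd := PySem.Dict.ofList
       (((items.map (fun i => i.1)).filter (fun n => !rev.contains n)).map
         (fun n => (n, ([] : List String))))
     (rev.update upd.items).items)
    = (let rev := items.foldl
         (fun d i => i.2.foldl (fun d parent => d.modify parent [] (fun l => l ++ [i.1])) d)
         PySem.Dict.empty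
       let result := PySem.Dict.ofList
         ((PySem.List.sorted rev.keys (fun x => x)).map
           (fun p => (p, PySem.List.sorted (rev.getD p []) (fun x => x))))
       let result2 := items.foldl
         (fun r i => if r.contains i.1 then r else r.insert i.1 []) result
       result2.items) := by
  simp only []
  rw [pv_fold_edges]
  set es := items.flatMap (fun i => i.2.map (fun parent => (parent, i.1))) with hes
  set S := PySem.List.sorted2 es (fun x => x.1) (fun x => x.2) with hS
  have hpw : S.Pairwise pvLexLe := pv_sorted2_pairwise es
  have hperm : S.Perm es := PySem.List.sorted2_perm es _ _ _
  set revB := es.foldl (fun d e => d.modify e.1 [] (fun l => l ++ [e.2])) PySem.Dict.empty with hrevB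
  set KA := PySem.Set.ofList (S.map (fun e => e.1)) with hKA
  set groups := KA.map (fun k => (k, (S.filter (fun e => e.1 == k)).map (fun e => e.2))) with hgroups
  have hG : pvGroupByFst S = groups := pv_groupBy_char S hpw
  have hgk : (groups.map (fun p => p.1)) = KA := by
    rw [hgroups, List.map_map]
    exact List.map_id _
  have hKAnd : KA.Nodup := PySem.Set.nodup_ofList _
  -- B-side bucket dict
  have hkeysB : revB.keys = PySem.Set.ofList (es.map (fun e => e.1)) := by
    rw [hrevB]
    rw [PySem.Dict.keys_foldl_modify_key es (fun e => e.1) [] (fun _ e => fun l => l ++ [e.2])]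
    rw [PySem.Dict.keys_empty, PySem.Set.update_nil_left]
  have hgetB : ∀ p, revB.getD p [] = (es.filter (fun e => e.1 == p)).map (fun e => e.2) := by
    intro p
    rw [hrevB, PySem.Dict.getD_foldl_modify_append es PySem.Dict.empty p, PySem.Dict.getD_empty]
    simp
  -- sorted keys agree
  have hKApw : KA.Pairwise (· < ·) := by
    have h1 : (S.map (fun e => e.1)).Pairwise (· ≤ ·) := by
      rw [List.pairwise_map]
      exact hpw.imp (fun h => by rcases h with h | ⟨h, _⟩; exact le_of_lt h; exact le_of_eq h)
    have h2 : KA.Pairwise (· ≤ ·) := List.Pairwise.sublist (pv_ofList_sublist _) h1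
    exact (h2.and hKAnd).imp (fun ⟨hle, hne⟩ => lt_of_le_of_ne hle hne)
  have hKB : PySem.List.sorted revB.keys (fun x => x) = KA := by
    apply PySem.List.sorted_eq_of_perm_of_pairwise_lt _ _ _ _ hKApw
    rw [hkeysB]
    rw [List.perm_ext_iff_of_nodup hKAnd (PySem.Set.nodup_ofList _)]
    intro a
    rw [hKA]
    rw [PySem.Set.mem_ofList, PySem.Set.mem_ofList]
    exact (hperm.map (fun e => e.1)).mem_iff
  -- sorted buckets agree
  have hVB : ∀ p, PySem.List.sorted (revB.getD p []) (fun x => x)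
      = (S.filter (fun e => e.1 == p)).map (fun e => e.2) := by
    intro p
    rw [hgetB p]
    apply PySem.List.sorted_id_eq_of_perm_of_pairwise
    · exact (hperm.filter _).map _
    · rw [List.pairwise_map]
      have hfpw : (S.filter (fun e => e.1 == p)).Pairwise pvLexLe :=
        List.Pairwise.sublist (List.filter_sublist) hpw
      apply hfpw.imp_of_mem
      intro a b ha hb hab
      have ha1 : a.1 = p := by simpa using (List.mem_filter.mp ha).2
      have hb1 : b.1 = p := by simpa using (List.mem_filter.mp hb).2
      rcases hab with h | ⟨_, h⟩
      · rw [ha1, hb1] at h; exact absurd h (lt_irrefl p)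
      · exact h
  -- B's result dict has exactly the group items
  have hLB : (PySem.List.sorted revB.keys (fun x => x)).map
      (fun p => (p, PySem.List.sorted (revB.getD p []) (fun x => x))) = groups := by
    rw [hKB, hgroups]
    exact List.map_congr_left (fun k _ => by rw [hVB k])
  rw [hG, hLB]
  -- now both sides are about Dict.ofList groups
  set dg := PySem.Dict.ofList groups with hdg
  have hdgitems : dg.items = groups := pv_ofList_items groups (hgk ▸ hKAnd)
  -- A's tail
  set updList := ((items.map (fun i => i.1)).filter (fun n => !dg.contains n)).map
    (fun n => (n, ([] : List String))) with hupdList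
  have hupdnd : (updList.map (fun p => p.1)).Nodup := by
    rw [hupdList, List.map_map]
    have : ((fun p => p.1) ∘ fun n : String => (n, ([] : List String))) = fun n => n := rfl
    rw [this, List.map_id']
    exact hnd.filter (fun n => !dg.contains n)
  have hupd : (PySem.Dict.ofList updList).items = updList := pv_ofList_items updList hupdnd
  have hAfinal : (dg.update (PySem.Dict.ofList updList).items).items = dg.items ++ updList := by
    rw [hupd, PySem.Dict.update]
    have := PySem.Dict.items_foldl_insert_fresh updList (fun p => p.1) (fun p => p.2) dg
      (by
        intro a ha
        rw [hupdList] at ha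
        obtain ⟨n, hn, rfl⟩ := List.mem_map.mp ha
        have := (List.mem_filter.mp hn).2
        simpa using this)
      hupdnd
    simpa using this
  rw [hAfinal]
  -- B's tail
  have hBfold : items.foldl (fun r i => if r.contains i.1 then r else r.insert i.1 []) dg
      = (items.map (fun i => i.1)).foldl
          (fun r n => if r.contains n then r else r.insert n []) dg := by
    rw [List.foldl_map]
  rw [hBfold, pv_fold_missing _ _ hnd]

-- ===== VERDICT (by name: the statement is the Claim_ definition above) =====
theorem reverse_dict_inclusive_spec : Claim_equal_reverse_dict_inclusive := by
  intro dag _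
  show reverse_dict_inclusive dag = reverse_dict_inclusive_alt dag
  have hnd : (((PySem.Dict.ofList dag).items).map (fun i => i.1)).Nodup :=
    PySem.Dict.nodup_keys_ofList dag
  exact pv_main (PySem.Dict.ofList dag).items hnd
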